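-- pv_equiv track=rewrite | github.com/wyk18703232953/myResearch | codeComplex/data copy/filteredData/python/cubic/python_cubic_0117.py | generate_test_case
-- ===== SOURCE A (Python) =====
-- def generate_test_case(idx, n):
--     # Deterministically generate S and T for test case idx, scale with n
--     # Let length of S be n + idx, length of T be n//2 + idx//2 (at least 1)
--     lenS = n + idx
--     lenT = max(1, n // 2 + idx // 2)
--
--     # Build S as repeating lowercase letters pattern
--     S = ''.join(chr(ord('a') + (i % 26)) for i in range(lenS))
--
--     # Build T as another deterministic pattern derived from S
--     # For diversity, pick characters from S at positions with step based on idx+1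
--     step = (idx + 1) % lenS or 1
--     T_chars = []
--     pos = 0
--     for _ in range(lenT):
--         T_chars.append(S[pos])
--         pos = (pos + step) % lenS
--     T = ''.join(T_chars)
--     return S, T
-- ===== SOURCE B (Python) =====
-- def generate_test_case(idx, n):
--     lenS = n + idx
--     lenT = max(1, n // 2 + idx // 2)
--     S = ''.join(chr(ord('a') + (i % 26)) for i in range(lenS))
--     step = (idx + 1) % lenS or 1
--     # The sampled positions k*step mod lenS are periodic with period lenS // gcd(step, lenS):
--     # build one period once, then tile it to length lenT.
--     a, b = step, lenS
--     while b:
--         a, b = b, a % b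
--     L = lenS // a
--     cycle = ''.join(S[(j * step) % lenS] for j in range(L))
--     reps = -(-lenT // L)
--     T = (cycle * reps)[:lenT]
--     return S, T
-- ===== Notes on version B (the rewrite author's own statement) =====
-- stated objective: alternative
-- what changed: Instead of stepping a running position lenT times, B computes the period of the sampling positions via a Euclid gcd, builds that one cycle of characters, and tiles it (string repetition + slice) to length lenT.
import Mathlib
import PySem

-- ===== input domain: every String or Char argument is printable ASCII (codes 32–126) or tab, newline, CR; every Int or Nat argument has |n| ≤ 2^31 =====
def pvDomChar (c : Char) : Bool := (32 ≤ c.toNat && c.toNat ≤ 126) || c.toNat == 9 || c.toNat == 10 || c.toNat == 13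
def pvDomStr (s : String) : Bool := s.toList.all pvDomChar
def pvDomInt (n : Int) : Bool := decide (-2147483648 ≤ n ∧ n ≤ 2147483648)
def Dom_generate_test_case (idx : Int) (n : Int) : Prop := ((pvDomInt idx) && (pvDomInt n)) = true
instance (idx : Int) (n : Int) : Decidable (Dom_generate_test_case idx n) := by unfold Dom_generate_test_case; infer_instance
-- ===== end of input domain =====

-- B computes the period of the sampling positions with a Euclid gcd, builds one cycle and tiles it to length lenT, instead of A's running-position loop; alternative decomposition, same cost.


-- ===== PORT A =====
-- S = ''.join(chr(ord('a') + (i % 26)) for i in range(lenS))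
def gtcAS (lenS : Int) : List Char :=
  (PySem.List.pyRange 0 lenS 1).map (fun i => Char.ofNat (97 + (PySem.Int.mod i 26)).toNat)

-- the for-loop over range(lenT) maintaining (T_chars, pos); fuel = lenT (loop count).
-- S[pos] is ported as pyGetD (pos is in range whenever Python does not raise; Pre_ excludes the raising inputs).
def gtcALoop (S : List Char) (lenS step : Int) : Nat → Int → List Char
  | 0, _ => []
  | t+1, pos => PySem.List.pyGetD S pos ' ' :: gtcALoop S lenS step t (PySem.Int.mod (pos + step) lenS)

def generate_test_case (idx : Int) (n : Int) : String × String :=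
  let lenS := n + idx
  let lenT := max 1 (PySem.Int.floordiv n 2 + PySem.Int.floordiv idx 2)
  let S := gtcAS lenS
  -- step = (idx + 1) % lenS or 1   (Python `or`: keep lhs if nonzero; %0 raises, excluded by Pre_)
  let step := if PySem.Int.mod (idx + 1) lenS ≠ 0 then PySem.Int.mod (idx + 1) lenS else 1
  (String.mk S, String.mk (gtcALoop S lenS step lenT.toNat 0))

-- ===== PORT B =====
def gtcBS (lenS : Int) : List Char :=
  (PySem.List.pyRange 0 lenS 1).map (fun i => Char.ofNat (97 + (PySem.Int.mod i 26)).toNat)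

-- the Euclid while-loop `while b: a, b = b, a % b`; fuel = lenS.toNat + 1 bounds its
-- iteration count (b strictly decreases while positive; it starts at lenS)
def gtcGcd : Nat → Int → Int → Int
  | 0, a, _ => a
  | f+1, a, b => if b ≠ 0 then gtcGcd f b (PySem.Int.mod a b) else a

def generate_test_case_alt (idx : Int) (n : Int) : String × String :=
  let lenS := n + idx
  let lenT := max 1 (PySem.Int.floordiv n 2 + PySem.Int.floordiv idx 2)
  let S := gtcBS lenS
  let step := if PySem.Int.mod (idx + 1) lenS ≠ 0 then PySem.Int.mod (idx + 1) lenS else 1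
  let g := gtcGcd (lenS.toNat + 1) step lenS
  let L := PySem.Int.floordiv lenS g
  -- cycle = ''.join(S[(j * step) % lenS] for j in range(L))
  let cycle := (PySem.List.pyRange 0 L 1).map
      (fun j => PySem.List.pyGetD S (PySem.Int.mod (j * step) lenS) ' ')
  let reps := -(PySem.Int.floordiv (-lenT) L)
  -- (cycle * reps)[:lenT]: string repetition then the prefix slice (lenT ≥ 1, so [:lenT] = take)
  let T := (List.flatten (List.replicate reps.toNat cycle)).take lenT.toNat
  (String.mk S, String.mk T)

-- ===== PRECONDITION & SPEC =====
-- Pre_ excludes exactly the inputs where Python A raises: lenS = n+idx = 0 gives ZeroDivisionError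
-- at `(idx+1) % lenS`, and lenS < 0 gives S = '' hence IndexError at S[pos] (lenT ≥ 1 always).
def Pre_generate_test_case (idx : Int) (n : Int) : Prop := 1 ≤ n + idx
instance (idx : Int) (n : Int) : Decidable (Pre_generate_test_case idx n) := by unfold Pre_generate_test_case; infer_instance
def pvWitness_generate_test_case : Int × Int := (1, 2)

def Spec_generate_test_case (idx : Int) (n : Int) (out : String × String) : Prop := out = generate_test_case_alt idx n
instance (idx : Int) (n : Int) (out : String × String) : Decidable (Spec_generate_test_case idx n out) := by unfold Spec_generate_test_case; infer_instance

-- ===== CLAIM (what is proved, stated in full; the proofs are below) =====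
def Claim_equal_generate_test_case : Prop := ∀ (idx : Int) (n : Int), Dom_generate_test_case idx n → Pre_generate_test_case idx n → Spec_generate_test_case idx n (generate_test_case idx n)

-- ===== LEMMAS AND PROOFS =====

-- A's loop invariant: starting from pos = (m*step) % lenS, the loop's output is the
-- closed-form sequence S[((m+k)*step) % lenS], k = 0..t-1.
theorem gtcALoop_eq_map (S : List Char) (lenS step : Int) (hS : 0 < lenS) :
    ∀ (t : Nat) (m : Int),
      gtcALoop S lenS step t (PySem.Int.mod (m * step) lenS)
        = (List.range t).map
            (fun (k : Nat) => PySem.List.pyGetD S (PySem.Int.mod ((m + (k : Int)) * step) lenS) ' ') := by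
  intro t
  induction t with
  | zero => intro m; simp [gtcALoop]
  | succ t ih =>
    intro m
    have hpos : PySem.Int.mod (PySem.Int.mod (m * step) lenS + step) lenS
        = PySem.Int.mod ((m + 1) * step) lenS := by
      simp only [PySem.Int.mod_eq_emod_of_pos hS, Int.emod_add_emod]
      ring_nf
    rw [List.range_succ_eq_map]
    simp only [gtcALoop, List.map_cons, List.map_map, hpos, ih (m + 1)]
    refine congrArg₂ _ (by norm_num) ?_
    apply List.map_congr_left
    intro k _
    simp only [Function.comp_apply]
    congr 2
    push_cast
    ring

-- the ported Euclid loop computes Int.gcd (given enough fuel and nonnegative inputs)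
theorem gtcGcd_eq_gcd : ∀ (fuel : Nat) (a b : Int), 0 ≤ a → 0 ≤ b → b.toNat < fuel →
    gtcGcd fuel a b = (Int.gcd a b : Int) := by
  intro fuel
  induction fuel with
  | zero => intro a b _ _ h; omega
  | succ f ih =>
    intro a b ha hb hfuel
    by_cases hb0 : b = 0
    · subst hb0
      simp only [gtcGcd, ne_eq, not_true_eq_false, if_false, Int.gcd_zero_right]
      omega
    · have hbpos : 0 < b := lt_of_le_of_ne hb (Ne.symm hb0)
      have hmod : PySem.Int.mod a b = a % b := PySem.Int.mod_eq_emod_of_pos hbpos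
      have hmn : 0 ≤ a % b := Int.emod_nonneg a hb0
      have hml : a % b < b := Int.emod_lt_of_pos a hbpos
      have : gtcGcd (f+1) a b = gtcGcd f b (a % b) := by
        simp [gtcGcd, hb0, hmod]
      rw [this, ih b (a % b) hb hmn (by omega)]
      rw [Int.gcd_comm b (a % b), Int.gcd_emod]

-- tiling: m copies of the first L values of f, flattened, equal f (j % L) for j < m*L
theorem flatten_replicate_map {α : Type} (f : Nat → α) (L : Nat) :
    ∀ (m : Nat), (List.replicate m ((List.range L).map f)).flatten
      = (List.range (m * L)).map (fun j => f (j % L)) := by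
  intro m
  induction m with
  | zero => simp
  | succ m ih =>
    have : (m + 1) * L = L + m * L := by ring
    rw [this, List.range_add, List.map_append, List.replicate_succ, List.flatten_cons, ih]
    congr 1
    · apply List.map_congr_left
      intro j hj
      rw [Nat.mod_eq_of_lt (List.mem_range.mp hj)]
    · rw [List.map_map]
      apply List.map_congr_left
      intro j _
      simp

theorem generate_test_case_spec : Claim_equal_generate_test_case := by
  intro idx n _ hpre
  unfold Spec_generate_test_case generate_test_case generate_test_case_alt gtcAS gtcBS
  have hS : (0 : Int) < n + idx := hpre
  set lenS := n + idx with hlenSdef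
  set S := (PySem.List.pyRange 0 lenS 1).map (fun i => Char.ofNat (97 + (PySem.Int.mod i 26)).toNat) with hSdef
  set step := if PySem.Int.mod (idx + 1) lenS ≠ 0 then PySem.Int.mod (idx + 1) lenS else 1 with hstepdef
  set lenT := max 1 (PySem.Int.floordiv n 2 + PySem.Int.floordiv idx 2) with hlenTdef
  have hstep : 0 ≤ step := by
    rw [hstepdef]
    split_ifs with h
    · exact PySem.Int.mod_nonneg _ hS
    · norm_num
  -- the gcd and its properties
  have hg : gtcGcd (lenS.toNat + 1) step lenS = (Int.gcd step lenS : Int) :=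
    gtcGcd_eq_gcd _ step lenS hstep (le_of_lt hS) (by omega)
  set g := (Int.gcd step lenS : Int) with hgdef
  have hgpos : 0 < g := by
    have : Int.gcd step lenS ≠ 0 := by
      intro h
      have := Int.eq_zero_of_gcd_eq_zero_right h
      omega
    positivity
  have hgdvdS : g ∣ step := by rw [hgdef]; exact Int.gcd_dvd_left step lenS
  have hgdvdL : g ∣ lenS := by rw [hgdef]; exact Int.gcd_dvd_right step lenS
  have hLdef : PySem.Int.floordiv lenS g = lenS / g := PySem.Int.floordiv_eq_ediv_of_pos hgpos
  set L := lenS / g with hLd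
  have hLg : L * g = lenS := Int.ediv_mul_cancel hgdvdL
  have hLpos : 0 < L := by
    rcases lt_trichotomy L 0 with h | h | h
    · nlinarith
    · rw [h] at hLg; omega
    · exact h
  -- L * step is a multiple of lenS
  obtain ⟨s, hs⟩ := hgdvdS
  have hLstep : L * step = lenS * s := by
    rw [hs, ← hLg]; ring
  -- periodicity of the closed-form position
  have hper : ∀ k : Int, PySem.Int.mod ((k % L) * step) lenS = PySem.Int.mod (k * step) lenS := by
    intro k
    rw [PySem.Int.mod_eq_emod_of_pos hS, PySem.Int.mod_eq_emod_of_pos hS]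
    have hexp : k * step = (k % L) * step + lenS * ((k / L) * s) := by
      calc k * step = (L * (k / L) + k % L) * step := by rw [Int.mul_ediv_add_emod k L]
        _ = (k % L) * step + (k / L) * (L * step) := by ring
        _ = (k % L) * step + lenS * ((k / L) * s) := by rw [hLstep]; ring
    rw [hexp, Int.add_mul_emod_self_left]
  -- reps bounds: lenT ≤ reps * L
  have hlenT1 : 1 ≤ lenT := le_max_left _ _
  have hrepsdef : PySem.Int.floordiv (-lenT) L = (-lenT) / L := PySem.Int.floordiv_eq_ediv_of_pos hLpos
  set reps := -((-lenT) / L) with hrepsd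
  have hrle : ((-lenT) / L) * L ≤ -lenT := Int.ediv_mul_le _ (by omega)
  have hcov : lenT ≤ reps * L := by
    have : reps * L = -(((-lenT) / L) * L) := by ring
    omega
  have hrepspos : 0 < reps := by nlinarith
  -- both T's reduce to the same closed-form map over range lenT.toNat
  refine Prod.ext rfl ?_
  show String.mk (gtcALoop S lenS step lenT.toNat 0)
      = String.mk ((List.flatten (List.replicate
          (-(PySem.Int.floordiv (-lenT) (PySem.Int.floordiv lenS (gtcGcd (lenS.toNat + 1) step lenS)))).toNat
          ((PySem.List.pyRange 0 (PySem.Int.floordiv lenS (gtcGcd (lenS.toNat + 1) step lenS)) 1).map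
            (fun j => PySem.List.pyGetD S (PySem.Int.mod (j * step) lenS) ' ')))).take lenT.toNat)
  rw [hg, hLdef, hrepsdef, ← hrepsd]
  -- A side
  have hinit : gtcALoop S lenS step lenT.toNat 0
      = gtcALoop S lenS step lenT.toNat (PySem.Int.mod (0 * step) lenS) := by
    simp [PySem.Int.mod_eq_emod_of_pos hS]
  rw [hinit, gtcALoop_eq_map S lenS step hS lenT.toNat 0]
  simp only [zero_add]
  -- B side: cycle as a map over List.range L.toNat
  have hcyc : (PySem.List.pyRange 0 L 1).map (fun j => PySem.List.pyGetD S (PySem.Int.mod (j * step) lenS) ' ')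
      = (List.range L.toNat).map (fun j : Nat => PySem.List.pyGetD S (PySem.Int.mod ((j : Int) * step) lenS) ' ') := by
    rw [PySem.List.pyRange_one 0 L, List.map_map]
    simp
  rw [hcyc, flatten_replicate_map]
  rw [← List.map_take, List.take_range]
  have hmin : min lenT.toNat (reps.toNat * L.toNat) = lenT.toNat := by
    have h1 : (lenT.toNat : Int) = lenT := Int.toNat_of_nonneg (by omega)
    have h2 : (reps.toNat : Int) = reps := Int.toNat_of_nonneg (by omega)
    have h3 : (L.toNat : Int) = L := Int.toNat_of_nonneg (by omega)
    have : (lenT.toNat : Int) ≤ (reps.toNat : Int) * (L.toNat : Int) := by rw [h1, h2, h3]; exact hcov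
    have : lenT.toNat ≤ reps.toNat * L.toNat := by exact_mod_cast this
    omega
  rw [hmin]
  congr 1
  apply List.map_congr_left
  intro k _
  have hmodcast : ((k % L.toNat : Nat) : Int) = (k : Int) % L := by
    have h3 : (L.toNat : Int) = L := Int.toNat_of_nonneg (by omega)
    rw [← h3]
    exact_mod_cast Int.natCast_emod k L.toNat
  rw [hmodcast, hper (k : Int)]
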